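-- pv_equiv track=rewrite | github.com/tph-kds/AVPoetica | mtm/mtm/processes/masktoken.py | _run_masked_count_syllables
-- ===== SOURCE A (Python) =====
-- def _run_masked_count_syllables(
--
--           masked_poem_input: str,
--           luc_bat: bool
-- ) -> str:
--     """
--     A function mask (line_relatedSentence) token into the final masked poem
--
--     Args:
--         stanza: stanza to check
--         luc_bat: whether or not the stanza is LỤC BÁT type stanza or not
--
--     Returns:
--         masked_poem(str): poem with error tokenization masked
--     """
--     first_sentence = True
--     j = 1
--     sentences = masked_poem_input.split("\n")
--     for i, sentence in enumerate(sentences):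
--         if luc_bat:
--             if first_sentence:
--                 sentence = sentence + " " + f"(6_{j})"
--                 first_sentence = False
--             else:
--                 sentence = sentence + " " + f"(8_{j})"
--                 first_sentence = True
--                 j += 1
--         else:
--             sentence = sentence + " " + f"(7_{i+1})"
--
--         sentences[i] = sentence
--
--     return "\n".join(sentences)
-- ===== SOURCE B (Python) =====
-- def _run_masked_count_syllables(masked_poem_input: str, luc_bat: bool) -> str:
--     # Single character-level scan: no split/join, no per-line list. A tag is
--     # inserted before every newline and at the end of the text; the line number
--     # is the only state.
--     def tag(i):
--         if luc_bat:
--             return f"({'6' if i % 2 == 0 else '8'}_{i // 2 + 1})"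
--         return f"(7_{i + 1})"
--
--     pieces = []
--     line_no = 0
--     for ch in masked_poem_input:
--         if ch == "\n":
--             pieces.append(" " + tag(line_no) + "\n")
--             line_no += 1
--         else:
--             pieces.append(ch)
--     pieces.append(" " + tag(line_no))
--     return "".join(pieces)
-- ===== Notes on version B (the rewrite author's own statement) =====
-- stated objective: alternative
-- what changed: Replaced A's split-into-lines / tag-each-line-with-threaded-toggle-and-counter / rejoin pipeline with a single character-level scan of the input that copies characters and inserts a tag before every newline and at the end, maintaining only the current line number.
import Mathlib
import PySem

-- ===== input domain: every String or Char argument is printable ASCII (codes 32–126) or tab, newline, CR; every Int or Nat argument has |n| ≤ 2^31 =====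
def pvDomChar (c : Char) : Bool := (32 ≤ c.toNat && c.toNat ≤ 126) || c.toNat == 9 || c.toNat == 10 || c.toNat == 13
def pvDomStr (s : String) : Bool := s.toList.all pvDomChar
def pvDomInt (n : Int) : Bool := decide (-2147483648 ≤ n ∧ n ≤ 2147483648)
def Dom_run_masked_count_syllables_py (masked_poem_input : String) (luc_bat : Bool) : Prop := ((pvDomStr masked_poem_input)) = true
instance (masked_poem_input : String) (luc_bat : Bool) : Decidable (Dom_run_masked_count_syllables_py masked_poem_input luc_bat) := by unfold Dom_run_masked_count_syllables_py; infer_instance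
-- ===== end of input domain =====

-- B replaces A's split-into-lines / tag-each-line / rejoin pipeline with a single
-- character-level scan that inserts a tag before each newline and at the end
-- (objective: alternative decomposition, no split/join and no per-line list).

-- ===== PORT A =====
-- the for-loop of A: state (first_sentence, j) threaded through the lines; i is the
-- enumerate index (used only in the non-luc_bat branch)
def pvLoopA (luc_bat : Bool) : List String → Bool → Int → Int → List String
  | [], _, _, _ => []
  | s :: rest, first, j, i =>
    if luc_bat then
      if first then
        (s ++ " " ++ ("(6_" ++ PySem.Int.toStr j ++ ")")) :: pvLoopA luc_bat rest false j (i + 1)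
      else
        (s ++ " " ++ ("(8_" ++ PySem.Int.toStr j ++ ")")) :: pvLoopA luc_bat rest true (j + 1) (i + 1)
    else
      (s ++ " " ++ ("(7_" ++ PySem.Int.toStr (i + 1) ++ ")")) :: pvLoopA luc_bat rest first j (i + 1)

def run_masked_count_syllables_py (masked_poem_input : String) (luc_bat : Bool) : String :=
  -- split("\n") with a nonempty literal separator never raises, so getD [] is never taken
  PySem.Str.join "\n" (pvLoopA luc_bat ((PySem.Str.split? masked_poem_input "\n").getD []) true 1 0)

-- ===== PORT B =====
-- Source B's tag(i) for line number i (a list of chars, as the piece it contributes)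
def pvTagB (luc_bat : Bool) (i : Nat) : List Char :=
  if luc_bat then
    ['('] ++ (if i % 2 == 0 then ['6'] else ['8']) ++ ['_']
      ++ PySem.Int.toChars ((i / 2 + 1 : Nat) : Int) ++ [')']
  else
    ['(', '7', '_'] ++ PySem.Int.toChars ((i : Int) + 1) ++ [')']

-- Source B's for-loop over the characters: the pieces list joined by "" IS the
-- concatenated character list built here; line_no is the only state
def pvScanB (luc_bat : Bool) : List Char → Nat → List Char
  | [], line_no => ' ' :: pvTagB luc_bat line_no
  | c :: rest, line_no =>
    if c == '\n' then (' ' :: pvTagB luc_bat line_no ++ ['\n']) ++ pvScanB luc_bat rest (line_no + 1)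
    else c :: pvScanB luc_bat rest line_no

def run_masked_count_syllables_py_alt (masked_poem_input : String) (luc_bat : Bool) : String :=
  String.ofList (pvScanB luc_bat masked_poem_input.toList 0)

-- ===== PRECONDITION & SPEC =====
def Spec_run_masked_count_syllables_py (masked_poem_input : String) (luc_bat : Bool) (out : String) : Prop := out = run_masked_count_syllables_py_alt masked_poem_input luc_bat
instance (masked_poem_input : String) (luc_bat : Bool) (out : String) : Decidable (Spec_run_masked_count_syllables_py masked_poem_input luc_bat out) := by unfold Spec_run_masked_count_syllables_py; infer_instance

-- ===== CLAIM (what is proved, stated in full; the proofs are below) =====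
def Claim_equal_run_masked_count_syllables_py : Prop := ∀ (masked_poem_input : String) (luc_bat : Bool), Dom_run_masked_count_syllables_py masked_poem_input luc_bat → Spec_run_masked_count_syllables_py masked_poem_input luc_bat (run_masked_count_syllables_py masked_poem_input luc_bat)

-- ===== LEMMAS AND PROOFS =====

-- the per-line tag string A's loop attaches at enumerate index p.1 (proof-only helper)
def pvLineTag (luc_bat : Bool) (p : Int × String) : String :=
  if luc_bat then
    p.2 ++ " (" ++ (if PySem.Int.mod p.1 2 == 0 then "6" else "8") ++ "_"
        ++ PySem.Int.toStr (PySem.Int.floordiv p.1 2 + 1) ++ ")"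
  else
    p.2 ++ " (7_" ++ PySem.Int.toStr (p.1 + 1) ++ ")"

-- tag-string algebra: A's "s + \" \" + tag" equals the f-string concatenation
theorem pvTag6_eq (s t : String) :
    s ++ " " ++ ("(6_" ++ t ++ ")") = s ++ " (" ++ "6" ++ "_" ++ t ++ ")" := by
  simp [← String.append_assoc]; simp [String.append_assoc]

theorem pvTag8_eq (s t : String) :
    s ++ " " ++ ("(8_" ++ t ++ ")") = s ++ " (" ++ "8" ++ "_" ++ t ++ ")" := by
  simp [← String.append_assoc]; simp [String.append_assoc]

-- non-luc_bat: the toggle and counter are dead state, each line's tag is (7_{i+1})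
theorem pvLoopA_false (lines : List String) :
    ∀ (first : Bool) (j i : Int),
      pvLoopA false lines first j i = (PySem.List.enumerate lines i).map (pvLineTag false) := by
  induction lines with
  | nil => intro first j i; simp [pvLoopA, PySem.List.enumerate_nil]
  | cons s rest ih =>
    intro first j i
    rw [PySem.List.enumerate_cons]
    simp only [pvLoopA, Bool.false_eq_true, if_false, List.map_cons, List.cons.injEq]
    refine ⟨?_, ih first j (i + 1)⟩
    simp [pvLineTag, ← String.append_assoc]; simp [String.append_assoc]

-- luc_bat: A's loop state at step i is determined by i: first_sentence = (i even), j = i/2 + 1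
theorem pvLoopA_true (lines : List String) :
    ∀ (i : Nat),
      pvLoopA true lines (decide (i % 2 = 0)) ((i / 2 : Nat) + 1) (i : Int)
        = (PySem.List.enumerate lines (i : Int)).map (pvLineTag true) := by
  induction lines with
  | nil => intro i; simp [pvLoopA, PySem.List.enumerate_nil]
  | cons s rest ih =>
    intro i
    rw [PySem.List.enumerate_cons]
    by_cases he : i % 2 = 0
    · have h1 : ¬ (i + 1) % 2 = 0 := by omega
      have h2 : (i + 1) / 2 = i / 2 := by omega
      simp only [pvLoopA, he, decide_true, if_true, List.map_cons, List.cons.injEq]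
      refine ⟨?_, ?_⟩
      · have hdvd : (2 : Int) ∣ (i : Int) := by omega
        simp [pvLineTag, hdvd, pvTag6_eq]
      · have := ih (i + 1)
        rw [show (decide ((i+1) % 2 = 0)) = false by simp [h1]] at this
        rw [h2] at this
        simpa [Nat.cast_add] using this
    · have h1 : (i + 1) % 2 = 0 := by omega
      have h2 : (i + 1) / 2 = i / 2 + 1 := by omega
      simp only [pvLoopA, he, decide_false, Bool.false_eq_true, if_false, if_true,
        List.map_cons, List.cons.injEq]
      refine ⟨?_, ?_⟩
      · have hodd : ((i : Int)) % 2 = 1 := by omega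
        simp [pvLineTag, hodd, pvTag8_eq]
      · have := ih (i + 1)
        rw [show (decide ((i+1) % 2 = 0)) = true by simp [h1]] at this
        rw [h2] at this
        push_cast at this ⊢
        exact this

-- PySem's fuelled split on the one-char separator '\n' is List.splitOnP (· == '\n')
theorem pvGo_eq : ∀ (l : List Char) (fuel : Nat) (cur : List Char) (acc : List (List Char)),
    l.length ≤ fuel →
    PySem.Chars.splitOn.go ['\n'] fuel l cur acc
      = acc.reverse ++ List.modifyHead (cur.reverse ++ ·) (List.splitOnP (fun c => c == '\n') l) := by
  intro l
  induction l with
  | nil =>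
    intro fuel cur acc _
    cases fuel <;> simp [PySem.Chars.splitOn.go, List.splitOnP_nil]
  | cons c rest ih =>
    intro fuel cur acc hle
    cases fuel with
    | zero => simp at hle
    | succ f =>
      by_cases hc : c = '\n'
      · have hgo : PySem.Chars.splitOn.go ['\n'] (f+1) (c::rest) cur acc
            = PySem.Chars.splitOn.go ['\n'] f rest [] (cur.reverse :: acc) := by
          simp [PySem.Chars.splitOn.go, List.isPrefixOf, hc]
        obtain ⟨h0, t, hsp⟩ := List.exists_cons_of_ne_nil (List.splitOnP_ne_nil (fun c => c == '\n') rest)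
        rw [hgo, ih f [] (cur.reverse :: acc) (by simpa using Nat.le_of_succ_le_succ hle)]
        simp [List.splitOnP_cons, hc, hsp]
      · have hgo : PySem.Chars.splitOn.go ['\n'] (f+1) (c::rest) cur acc
            = PySem.Chars.splitOn.go ['\n'] f rest (c :: cur) acc := by
          simp [PySem.Chars.splitOn.go, List.isPrefixOf, Ne.symm hc]
        obtain ⟨h0, t, hsp⟩ := List.exists_cons_of_ne_nil (List.splitOnP_ne_nil (fun c => c == '\n') rest)
        rw [hgo, ih f (c :: cur) acc (by simpa using Nat.le_of_succ_le_succ hle)]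
        simp [List.splitOnP_cons, hc, hsp]

theorem pvSplitOn_eq (s : List Char) :
    PySem.Chars.splitOn s ['\n'] = List.splitOnP (fun c => c == '\n') s := by
  obtain ⟨h0, t, hsp⟩ := List.exists_cons_of_ne_nil (List.splitOnP_ne_nil (fun c => c == '\n') s)
  rw [PySem.Chars.splitOn, pvGo_eq s (s.length + 1) [] [] (by omega)]
  simp [hsp]

-- mapIdx respects pointwise-equal index functions
theorem pvMapIdx_ext {α β : Type} (f g : Nat → α → β) :
    ∀ (l : List α), (∀ k a, f k a = g k a) → List.mapIdx f l = List.mapIdx g l := by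
  intro l
  induction l generalizing f g with
  | nil => intro _; simp
  | cons a t ih => intro h; simp [List.mapIdx_cons, h, ih _ _ (fun k a => h (k+1) a)]

theorem pvJoin_cons (c : Char) (y : List Char) (ys : List (List Char)) :
    PySem.Chars.join ['\n'] ((c :: y) :: ys) = c :: PySem.Chars.join ['\n'] (y :: ys) := by
  cases ys <;> simp [PySem.Chars.join_singleton, PySem.Chars.join_cons_cons]

-- B's scan equals "join the tagged lines of the splitOnP decomposition"
theorem pvScanB_eq (luc_bat : Bool) : ∀ (cs : List Char) (i : Nat),
    pvScanB luc_bat cs i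
      = PySem.Chars.join ['\n']
          ((List.splitOnP (fun c => c == '\n') cs).mapIdx
            (fun k l => l ++ ' ' :: pvTagB luc_bat (i + k))) := by
  intro cs
  induction cs with
  | nil =>
    intro i
    simp [pvScanB, List.splitOnP_nil, PySem.Chars.join_singleton]
  | cons c rest ih =>
    intro i
    obtain ⟨h0, t, hsp⟩ := List.exists_cons_of_ne_nil (List.splitOnP_ne_nil (fun c => c == '\n') rest)
    by_cases hc : c = '\n'
    · simp only [pvScanB, hc, beq_self_eq_true, if_true, ih (i + 1),
        List.splitOnP_cons, List.mapIdx_cons, hsp]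
      rw [PySem.Chars.join_cons_cons]
      refine congrArg _ (congrArg _ (congrArg₂ List.cons (by norm_num) ?_))
      apply pvMapIdx_ext
      intro k l
      have : i + 1 + (k + 1) = i + (k + 1 + 1) := by omega
      rw [this]
    · simp only [pvScanB, beq_iff_eq, hc, if_false, ih i,
        List.splitOnP_cons, List.modifyHead, hsp, List.mapIdx_cons]
      rw [show (c :: h0) ++ ' ' :: pvTagB luc_bat (i + 0) = c :: (h0 ++ ' ' :: pvTagB luc_bat (i + 0)) from rfl,
        pvJoin_cons]

-- mapIdx over a mapped list
theorem pvMapIdx_map {α β γ : Type} (g : α → β) :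
    ∀ (l : List α) (f : Nat → β → γ),
      List.mapIdx f (l.map g) = List.mapIdx (fun i a => f i (g a)) l := by
  intro l
  induction l with
  | nil => intro f; simp
  | cons a t ih => intro f; simp [List.mapIdx_cons, ih]

-- enumerate-then-map is mapIdx with a shifted index
theorem pvEnum_mapIdx (f : Int × String → List Char) :
    ∀ (xs : List String) (i : Nat),
      (PySem.List.enumerate xs (i : Int)).map f
        = xs.mapIdx (fun k x => f (((i + k : Nat) : Int), x)) := by
  intro xs
  induction xs with
  | nil => intro i; simp [PySem.List.enumerate_nil]
  | cons x t ih =>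
    intro i
    rw [PySem.List.enumerate_cons]
    have h1 : ((i : Int) + 1) = ((i + 1 : Nat) : Int) := by push_cast; ring
    simp only [List.map_cons, h1, ih (i + 1), List.mapIdx_cons]
    refine congrArg₂ List.cons (by norm_num) ?_
    apply pvMapIdx_ext
    intro k y
    have : i + 1 + k = i + (k + 1) := by omega
    rw [this]

-- the char-list of A's tagged line at index k is B's tagged char line
theorem pvLineTag_toList (luc_bat : Bool) (k : Nat) (s : String) :
    (pvLineTag luc_bat ((k : Int), s)).toList = s.toList ++ ' ' :: pvTagB luc_bat k := by
  cases luc_bat with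
  | false =>
    simp [pvLineTag, pvTagB, String.toList_append, PySem.Int.toList_toStr]
  | true =>
    have hdiv : PySem.Int.floordiv (k : Int) 2 + 1 = ((k / 2 + 1 : Nat) : Int) := by
      rw [PySem.Int.floordiv_eq_ediv_of_pos (by omega)]; omega
  -- hdiv may be consumed by simp below
    by_cases he : k % 2 = 0
    · have hdvd : (2 : Int) ∣ (k : Int) := by omega
      simp [pvLineTag, pvTagB, he, hdvd, String.toList_append, PySem.Int.toList_toStr]
    · have hodd : ((k : Int)) % 2 = 1 := by omega
      simp [pvLineTag, pvTagB, he, hodd, String.toList_append, PySem.Int.toList_toStr]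

-- ===== VERDICT (by name: the statement is the Claim_ definition above) =====
theorem run_masked_count_syllables_py_spec : Claim_equal_run_masked_count_syllables_py := by
  intro m luc _
  unfold Spec_run_masked_count_syllables_py run_masked_count_syllables_py run_masked_count_syllables_py_alt
  have hnl : ("\n" : String).toList = ['\n'] := by decide
  have hsplit : (PySem.Str.split? m "\n").getD []
      = (List.splitOnP (fun c => c == '\n') m.toList).map String.ofList := by
    simp [PySem.Str.split?, PySem.Chars.split?, hnl, pvSplitOn_eq]
  have hloop : pvLoopA luc ((PySem.Str.split? m "\n").getD []) true 1 0
      = (PySem.List.enumerate ((PySem.Str.split? m "\n").getD []) 0).map (pvLineTag luc) := by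
    cases luc
    · exact pvLoopA_false _ true 1 0
    · simpa using pvLoopA_true ((PySem.Str.split? m "\n").getD []) 0
  have key : (PySem.Str.join "\n" (pvLoopA luc ((PySem.Str.split? m "\n").getD []) true 1 0)).toList
      = pvScanB luc m.toList 0 := by
    rw [PySem.Str.toList_join, hnl, hloop, hsplit, List.map_map,
      show ((PySem.List.enumerate ((List.splitOnP (fun c => c == '\n') m.toList).map String.ofList) 0)).map
          (String.toList ∘ pvLineTag luc)
        = ((PySem.List.enumerate ((List.splitOnP (fun c => c == '\n') m.toList).map String.ofList) ((0 : Nat) : Int))).map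
          (fun p => (pvLineTag luc p).toList) from rfl,
      pvEnum_mapIdx (fun p => (pvLineTag luc p).toList),
      pvMapIdx_map, pvScanB_eq]
    refine congrArg _ ?_
    apply pvMapIdx_ext
    intro k l
    simp [pvLineTag_toList, String.toList_ofList]
  have h2 := congrArg String.ofList key
  simpa [String.ofList_toList] using h2
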